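-- pv_equiv track=rewrite | github.com/PrivacyGuard-PETS/PrivacyGuard | Python/utils/application.py | get_op_each_method_call_paths
-- ===== SOURCE A (Python) =====
-- def get_op_each_method_call_paths(
--
--     method_call_text_s: str,
--     method_call_method_node_d: dict,
--     adjacent_matrix_d: dict,
--     method_call_ud: dict,
-- ):
--     raw_tca_rules_l, tree_nodes_l, paths_nodes_l = [], [], []
--     visited_l = []
--
--     tree_nodes_l.append(method_call_text_s)
--     paths_nodes_l.append([method_call_text_s])
--
--     while len(tree_nodes_l) > 0:
--         tree_node_s: str = tree_nodes_l.pop()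
--         path_node_l: list = paths_nodes_l.pop()
--
--         if tree_node_s in visited_l:
--             continue
--         visited_l.append(tree_node_s)
--
--         method_node_d = method_call_method_node_d.get(tree_node_s, {})
--         for method_node_s in method_node_d:
--             adjacent_method_calls_l: list = adjacent_matrix_d.get(method_node_s, [])
--             if len(adjacent_method_calls_l) == 0:
--                 raw_tca_rules_l.append(path_node_l[:])
--             for adjacent_method_call_s in adjacent_method_calls_l:
--                 tree_nodes_l.append(adjacent_method_call_s)
--                 tmp_path_l = path_node_l[:]
--                 tmp_path_l.extend([method_node_s, adjacent_method_call_s])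
--                 paths_nodes_l.append(tmp_path_l[:])
--
--     return raw_tca_rules_l
-- ===== SOURCE B (Python) =====
-- def get_op_each_method_call_paths(
--     method_call_text_s: str,
--     method_call_method_node_d: dict,
--     adjacent_matrix_d: dict,
--     method_call_ud: dict,
-- ):
--     results = []
--     visited = set()
--
--     def dfs(node, path):
--         if node in visited:
--             return
--         visited.add(node)
--         methods = list(method_call_method_node_d.get(node, {}))
--         for m in methods:
--             if not adjacent_matrix_d.get(m, []):
--                 results.append(path[:])
--         # recurse in reversed order to mirror the LIFO order of a worklist
--         children = [(m, a) for m in reversed(methods)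
--                     for a in reversed(adjacent_matrix_d.get(m, []))]
--         for m, a in children:
--             dfs(a, path + [m, a])
--
--     dfs(method_call_text_s, [method_call_text_s])
--     return results
-- ===== Notes on version B (the rewrite author's own statement) =====
-- stated objective: alternative
-- what changed: Replaces the explicit two-parallel-stack while-loop (LIFO worklist with paths stored per stack entry) by a recursive DFS helper with a shared visited set, recursing into children in reversed order to reproduce the worklist's LIFO traversal and output order exactly.
import Mathlib
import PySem

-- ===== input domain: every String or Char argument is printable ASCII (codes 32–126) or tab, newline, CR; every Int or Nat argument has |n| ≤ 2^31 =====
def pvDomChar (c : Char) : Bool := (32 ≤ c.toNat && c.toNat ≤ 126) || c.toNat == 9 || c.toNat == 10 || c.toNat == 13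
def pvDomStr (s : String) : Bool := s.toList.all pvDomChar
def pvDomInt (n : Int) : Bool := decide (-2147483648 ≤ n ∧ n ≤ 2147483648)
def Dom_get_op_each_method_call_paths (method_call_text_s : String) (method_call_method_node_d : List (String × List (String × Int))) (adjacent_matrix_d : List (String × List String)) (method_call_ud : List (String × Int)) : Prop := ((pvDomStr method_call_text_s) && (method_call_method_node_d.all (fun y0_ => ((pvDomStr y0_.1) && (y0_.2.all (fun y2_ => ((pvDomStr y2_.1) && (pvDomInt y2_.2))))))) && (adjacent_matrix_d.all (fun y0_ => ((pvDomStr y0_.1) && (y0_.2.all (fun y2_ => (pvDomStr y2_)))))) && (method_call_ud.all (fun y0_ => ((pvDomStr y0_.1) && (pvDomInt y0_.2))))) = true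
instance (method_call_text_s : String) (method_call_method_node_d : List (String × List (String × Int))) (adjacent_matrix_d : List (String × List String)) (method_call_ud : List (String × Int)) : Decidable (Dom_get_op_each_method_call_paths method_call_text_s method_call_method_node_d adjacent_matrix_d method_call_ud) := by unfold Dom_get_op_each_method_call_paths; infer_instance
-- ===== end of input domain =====

-- B re-implements the explicit two-stack worklist as a recursive DFS (children visited in
-- reversed order to reproduce the LIFO order); same return value, different decomposition.

-- Fuel: a generous upper bound on the number of node pops / DFS calls, used only as a
-- totality guard by both ports (the traversal always stops by itself before it runs out:
-- each node is expanded at most once and each expansion pushes at most Σ|methods|·Σ|adj|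
-- children, over at most 1 + Σ|adj lists| distinct reachable nodes).
def pvFuelGOP (method_call_method_node_d : List (String × List (String × Int))) (adjacent_matrix_d : List (String × List String)) : Nat :=
  let aTot := adjacent_matrix_d.foldl (fun a p => a + p.2.length) 0
  let mTot := method_call_method_node_d.foldl (fun a p => a + p.2.length) 0
  (1 + aTot) * (mTot * aTot + 1) + 2

-- ===== PORT A =====
-- A's while-loop over the two parallel stacks (head of the list = Python's end, where
-- append/pop act); the for-loops over the method dict and the adjacency list are folds
-- updating (raw_tca_rules_l, tree_nodes_l, paths_nodes_l).  The stacks always have equal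
-- length, so the mismatched pattern below is unreachable.
def goepLoop (d : List (String × List (String × Int))) (adj : List (String × List String)) :
    Nat → List String → List (List String) → List String → List (List String) → List (List String)
  | 0, _, _, _, raw => raw
  | _ + 1, [], _, _, raw => raw
  | _ + 1, _ :: _, [], _, raw => raw
  | Nat.succ f, n :: ns, p :: ps, v, raw =>
    if n ∈ v then goepLoop d adj f ns ps v raw
    else
      let st := (PySem.Dict.getD (PySem.Dict.mk d) n []).foldl
        (fun (st : List (List String) × List String × List (List String)) mq =>
          let as := PySem.Dict.getD (PySem.Dict.mk adj) mq.1 []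
          let st := if as.length = 0 then (st.1 ++ [p], st.2.1, st.2.2) else st
          as.foldl (fun st2 a => (st2.1, a :: st2.2.1, (p ++ [mq.1, a]) :: st2.2.2)) st)
        (raw, ns, ps)
      goepLoop d adj f st.2.1 st.2.2 (v ++ [n]) st.1

def get_op_each_method_call_paths (method_call_text_s : String) (method_call_method_node_d : List (String × List (String × Int))) (adjacent_matrix_d : List (String × List String)) (method_call_ud : List (String × Int)) : List (List String) :=
  goepLoop method_call_method_node_d adjacent_matrix_d
    (pvFuelGOP method_call_method_node_d adjacent_matrix_d)
    [method_call_text_s] [[method_call_text_s]] [] []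

-- ===== PORT B =====
-- Source B's recursive dfs; the visited set is the list of its distinct elements (only ever
-- extended when the node is absent), results/visited are threaded, and the returned fuel
-- (one unit per dfs call) carries its bound so the recursion is structural.
mutual
def goepDfs (d : List (String × List (String × Int))) (adj : List (String × List String))
    (f : Nat) (n : String) (path : List String) (v : List String) :
    (List (List String) × List String) × {f' : Nat // f' ≤ f} :=
  match f with
  | 0 => (([], v), ⟨0, Nat.le_refl 0⟩)
  | Nat.succ f =>
    if n ∈ v then (([], v), ⟨f, Nat.le_succ f⟩)
    else
      let ms := (PySem.Dict.getD (PySem.Dict.mk d) n []).map Prod.fst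
      let imm := ms.foldl
        (fun acc m => if (PySem.Dict.getD (PySem.Dict.mk adj) m [] : List String) = [] then acc ++ [path] else acc) []
      let children := ms.reverse.flatMap
        (fun m => (PySem.Dict.getD (PySem.Dict.mk adj) m []).reverse.map (fun a => (m, a)))
      match goepDfsList d adj f children path (v ++ [n]) with
      | (r, ⟨f', hf⟩) => ((imm ++ r.1, r.2), ⟨f', Nat.le_succ_of_le hf⟩)
termination_by (f, 0)
decreasing_by
  exact Prod.Lex.left _ _ (Nat.lt_succ_self f)

def goepDfsList (d : List (String × List (String × Int))) (adj : List (String × List String))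
    (f : Nat) (cs : List (String × String)) (path : List String) (v : List String) :
    (List (List String) × List String) × {f' : Nat // f' ≤ f} :=
  match cs with
  | [] => (([], v), ⟨f, Nat.le_refl f⟩)
  | c :: rest =>
    match goepDfs d adj f c.2 (path ++ [c.1, c.2]) v with
    | (r1, ⟨f1, hf1⟩) =>
      match goepDfsList d adj f1 rest path r1.2 with
      | (r2, ⟨f2, hf2⟩) => ((r1.1 ++ r2.1, r2.2), ⟨f2, Nat.le_trans hf2 hf1⟩)
termination_by (f, cs.length + 1)
decreasing_by
  · exact Prod.Lex.right f (Nat.succ_pos _)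
  · rcases Nat.lt_or_eq_of_le hf1 with h | h
    · exact Prod.Lex.left _ _ h
    · subst h; exact Prod.Lex.right f1 (Nat.lt_succ_self _)
end

def get_op_each_method_call_paths_alt (method_call_text_s : String) (method_call_method_node_d : List (String × List (String × Int))) (adjacent_matrix_d : List (String × List String)) (method_call_ud : List (String × Int)) : List (List String) :=
  (goepDfs method_call_method_node_d adjacent_matrix_d
    (pvFuelGOP method_call_method_node_d adjacent_matrix_d)
    method_call_text_s [method_call_text_s] []).1.1

-- ===== PRECONDITION & SPEC =====
def Spec_get_op_each_method_call_paths (method_call_text_s : String) (method_call_method_node_d : List (String × List (String × Int))) (adjacent_matrix_d : List (String × List String)) (method_call_ud : List (String × Int)) (out : List (List String)) : Prop := out = get_op_each_method_call_paths_alt method_call_text_s method_call_method_node_d adjacent_matrix_d method_call_ud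
instance (method_call_text_s : String) (method_call_method_node_d : List (String × List (String × Int))) (adjacent_matrix_d : List (String × List String)) (method_call_ud : List (String × Int)) (out : List (List String)) : Decidable (Spec_get_op_each_method_call_paths method_call_text_s method_call_method_node_d adjacent_matrix_d method_call_ud out) := by unfold Spec_get_op_each_method_call_paths; infer_instance

-- ===== CLAIM (what is proved, stated in full; the proofs are below) =====
def Claim_equal_get_op_each_method_call_paths : Prop := ∀ (method_call_text_s : String) (method_call_method_node_d : List (String × List (String × Int))) (adjacent_matrix_d : List (String × List String)) (method_call_ud : List (String × Int)), Dom_get_op_each_method_call_paths method_call_text_s method_call_method_node_d adjacent_matrix_d method_call_ud → Spec_get_op_each_method_call_paths method_call_text_s method_call_method_node_d adjacent_matrix_d method_call_ud (get_op_each_method_call_paths method_call_text_s method_call_method_node_d adjacent_matrix_d method_call_ud)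

-- ===== LEMMAS AND PROOFS =====

-- Proof-side runner: process a stack of (node, full-path) pairs left to right, threading
-- visited and fuel exactly as goepDfs does.
def goepRun (d : List (String × List (String × Int))) (adj : List (String × List String)) :
    Nat → List (String × List String) → List String →
    (List (List String) × List String) × Nat
  | f, [], v => (([], v), f)
  | f, (n, p) :: rest, v =>
    match goepDfs d adj f n p v with
    | (r1, ⟨f1, _⟩) =>
      let r2 := goepRun d adj f1 rest r1.2
      ((r1.1 ++ r2.1.1, r2.1.2), r2.2)
termination_by f pairs _ => (f, pairs.length)
decreasing_by
  rename_i hf1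
  rcases Nat.lt_or_eq_of_le hf1 with h | h
  · exact Prod.Lex.left _ _ h
  · subst h; exact Prod.Lex.right _ (Nat.lt_succ_self _)

-- the forward list of (method, adjacent) children of a node with key list ms
def goepCh (adj : List (String × List String)) (ms : List String) : List (String × String) :=
  ms.flatMap (fun m => (PySem.Dict.getD (PySem.Dict.mk adj) m []).map (fun a => (m, a)))

def goepImm (adj : List (String × List String)) (p : List String) (ms : List String) : List (List String) :=
  ms.foldl (fun acc m => if (PySem.Dict.getD (PySem.Dict.mk adj) m [] : List String) = [] then acc ++ [p] else acc) []

theorem goepRun_zero (d : List (String × List (String × Int))) (adj : List (String × List String))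
    (pairs : List (String × List String)) (v : List String) :
    goepRun d adj 0 pairs v = (([], v), 0) := by
  induction pairs with
  | nil => simp [goepRun]
  | cons hd tl ih => cases hd; simp only [goepRun, goepDfs]; simpa using ih

theorem goepRun_append (d : List (String × List (String × Int))) (adj : List (String × List String))
    (xs ys : List (String × List String)) (f : Nat) (v : List String) :
    goepRun d adj f (xs ++ ys) v =
      (((goepRun d adj f xs v).1.1 ++ (goepRun d adj (goepRun d adj f xs v).2 ys (goepRun d adj f xs v).1.2).1.1,
        (goepRun d adj (goepRun d adj f xs v).2 ys (goepRun d adj f xs v).1.2).1.2),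
       (goepRun d adj (goepRun d adj f xs v).2 ys (goepRun d adj f xs v).1.2).2) := by
  induction xs generalizing f v with
  | nil => simp [goepRun]
  | cons hd tl ih =>
    cases hd
    simp only [List.cons_append, goepRun]
    rcases h : goepDfs d adj f _ _ v with ⟨r1, ⟨f1, hf1⟩⟩
    simp [goepRun, h, ih]

theorem goepDfsList_eq_run (d : List (String × List (String × Int))) (adj : List (String × List String))
    (cs : List (String × String)) (f : Nat) (path v : List String) :
    ((goepDfsList d adj f cs path v).1, (goepDfsList d adj f cs path v).2.1)
      = ((goepRun d adj f (cs.map (fun c => (c.2, path ++ [c.1, c.2]))) v).1,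
         (goepRun d adj f (cs.map (fun c => (c.2, path ++ [c.1, c.2]))) v).2) := by
  induction cs generalizing f v with
  | nil => simp [goepDfsList, goepRun]
  | cons hd tl ih =>
    rcases hd with ⟨m, a⟩
    simp only [goepDfsList, List.map_cons, goepRun]
    rcases h : goepDfs d adj f a (path ++ [m, a]) v with ⟨r1, ⟨f1, hf1⟩⟩
    rcases h2 : goepDfsList d adj f1 tl path r1.2 with ⟨r2, ⟨f2, hf2⟩⟩
    have h3 := ih f1 r1.2
    rw [h2] at h3
    simp only [Prod.mk.injEq] at h3
    obtain ⟨ha, hb⟩ := h3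
    simp [ha, hb]

-- characterisation of the inner push-fold of goepLoop over one adjacency list
theorem goepPush (p : List String) (m : String) (as : List String)
    (raw : List (List String)) (ns : List String) (ps : List (List String)) :
    as.foldl (fun st2 a => (st2.1, a :: st2.2.1, (p ++ [m, a]) :: st2.2.2)) (raw, ns, ps)
      = (raw, as.reverse ++ ns, (as.map (fun a => p ++ [m, a])).reverse ++ ps) := by
  induction as generalizing ns ps with
  | nil => simp
  | cons a tl ih => simp [ih]

-- goepImm over an accumulator
theorem goepImm_acc (adj : List (String × List String)) (p : List String)
    (ms : List String) (acc : List (List String)) :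
    ms.foldl (fun acc m => if (PySem.Dict.getD (PySem.Dict.mk adj) m [] : List String) = [] then acc ++ [p] else acc) acc
      = acc ++ goepImm adj p ms := by
  induction ms generalizing acc with
  | nil => simp [goepImm]
  | cons m tl ih =>
    simp only [goepImm, List.foldl_cons] at *
    rw [ih, ih (if (PySem.Dict.getD (PySem.Dict.mk adj) m [] : List String) = [] then [] ++ [p] else [])]
    split_ifs <;> simp

theorem goepImm_cons (adj : List (String × List String)) (p : List String)
    (m : String) (ms : List String) :
    goepImm adj p (m :: ms)
      = (if (PySem.Dict.getD (PySem.Dict.mk adj) m [] : List String) = [] then [p] else [])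
        ++ goepImm adj p ms := by
  simp only [goepImm, List.foldl_cons]
  rw [goepImm_acc adj p ms]
  split_ifs <;> simp [goepImm]

theorem goepCh_rev (adj : List (String × List String)) (ms : List String) :
    ms.reverse.flatMap (fun m => (PySem.Dict.getD (PySem.Dict.mk adj) m []).reverse.map (fun a => (m, a)))
      = (goepCh adj ms).reverse := by
  induction ms with
  | nil => simp [goepCh]
  | cons m tl ih =>
    simp only [goepCh] at *
    rw [List.reverse_flatMap]
    simp only [Function.comp_def, List.map_reverse]

-- characterisation of goepLoop's fold over the method entries
theorem goepFold (adj : List (String × List String)) (p : List String)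
    (es : List (String × Int)) (raw : List (List String)) (ns : List String) (ps : List (List String)) :
    es.foldl
      (fun (st : List (List String) × List String × List (List String)) mq =>
        let as := PySem.Dict.getD (PySem.Dict.mk adj) mq.1 []
        let st := if as.length = 0 then (st.1 ++ [p], st.2.1, st.2.2) else st
        as.foldl (fun st2 a => (st2.1, a :: st2.2.1, (p ++ [mq.1, a]) :: st2.2.2)) st)
      (raw, ns, ps)
      = (raw ++ goepImm adj p (es.map Prod.fst),
         ((goepCh adj (es.map Prod.fst)).map Prod.snd).reverse ++ ns,
         ((goepCh adj (es.map Prod.fst)).map (fun c => p ++ [c.1, c.2])).reverse ++ ps) := by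
  induction es generalizing raw ns ps with
  | nil => simp [goepImm, goepCh]
  | cons e tl ih =>
    simp only [List.foldl_cons, List.map_cons]
    rw [goepPush]
    by_cases h : (PySem.Dict.getD (PySem.Dict.mk adj) e.1 [] : List String) = []
    · simp only [h, List.length_nil, List.reverse_nil, List.map_nil,
        List.nil_append, reduceIte]
      rw [ih]
      have himm : goepImm adj p (e.1 :: tl.map Prod.fst)
          = [p] ++ goepImm adj p (tl.map Prod.fst) := by
        rw [goepImm_cons]
        simp [h]
      have hch : goepCh adj (e.1 :: tl.map Prod.fst) = goepCh adj (tl.map Prod.fst) := by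
        simp [goepCh, h]
      rw [himm, hch]
      simp
    · have hlen : ¬ (PySem.Dict.getD (PySem.Dict.mk adj) e.1 [] : List String).length = 0 := by
        simpa [List.length_eq_zero_iff] using h
      simp only [if_neg hlen]
      rw [ih]
      have himm : goepImm adj p (e.1 :: tl.map Prod.fst)
          = goepImm adj p (tl.map Prod.fst) := by
        rw [goepImm_cons]
        simp [h]
      have hch : goepCh adj (e.1 :: tl.map Prod.fst)
          = (PySem.Dict.getD (PySem.Dict.mk adj) e.1 []).map (fun a => (e.1, a))
            ++ goepCh adj (tl.map Prod.fst) := by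
        simp [goepCh]
      rw [himm, hch]
      simp [List.reverse_append, List.map_map, Function.comp]

-- main simulation lemma: the worklist loop equals the sequential DFS runner
theorem goep_main (d : List (String × List (String × Int))) (adj : List (String × List String))
    (f : Nat) (pairs : List (String × List String)) (v : List String) (raw : List (List String)) :
    goepLoop d adj f (pairs.map Prod.fst) (pairs.map Prod.snd) v raw
      = raw ++ (goepRun d adj f pairs v).1.1 := by
  induction f generalizing pairs v raw with
  | zero => cases pairs <;> simp [goepLoop, goepRun_zero]
  | succ f ih =>
    cases pairs with
    | nil => simp [goepLoop, goepRun]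
    | cons hd rest =>
      rcases hd with ⟨n, p⟩
      simp only [List.map_cons, goepLoop, goepRun]
      by_cases hmem : n ∈ v
      · simp only [if_pos hmem]
        rw [ih]
        simp [goepDfs, if_pos hmem, goepRun]
      · simp only [if_neg hmem]
        rw [goepFold adj p]
        set ms := (PySem.Dict.getD (PySem.Dict.mk d) n []).map Prod.fst with hms
        set newpairs := ((goepCh adj ms).reverse.map (fun c => (c.2, p ++ [c.1, c.2]))) with hnp
        have hfst : ((goepCh adj ms).map Prod.snd).reverse ++ rest.map Prod.fst
            = (newpairs ++ rest).map Prod.fst := by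
          simp [hnp, List.map_reverse, List.map_map, Function.comp]
        have hsnd : ((goepCh adj ms).map (fun c => p ++ [c.1, c.2])).reverse ++ rest.map Prod.snd
            = (newpairs ++ rest).map Prod.snd := by
          simp [hnp, List.map_reverse, List.map_map, Function.comp]
        rw [hfst, hsnd, ih]
        rw [goepRun_append]
        -- identify goepRun on newpairs with goepDfsList on the reversed children
        have hlist := goepDfsList_eq_run d adj (goepCh adj ms).reverse f p (v ++ [n])
        have hmapnp : (goepCh adj ms).reverse.map (fun c => (c.2, p ++ [c.1, c.2])) = newpairs := by
          rw [hnp]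
        rw [hmapnp] at hlist
        -- unfold the RHS one step of goepRun / goepDfs
        simp only [goepDfs, if_neg hmem]
        rw [← hms, goepCh_rev adj ms]
        rcases hdl : goepDfsList d adj f (goepCh adj ms).reverse p (v ++ [n]) with ⟨r, ⟨f2, hf2⟩⟩
        rw [hdl] at hlist
        simp only [Prod.mk.injEq] at hlist
        obtain ⟨ha, hb⟩ := hlist
        simp [ha, hb, goepImm, List.append_assoc]

-- ===== VERDICT (by name: the statement is the Claim_ definition above) =====
theorem get_op_each_method_call_paths_spec : Claim_equal_get_op_each_method_call_paths := by
  intro s d adj ud _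
  unfold Spec_get_op_each_method_call_paths get_op_each_method_call_paths get_op_each_method_call_paths_alt
  have h := goep_main d adj (pvFuelGOP d adj) [(s, [s])] [] []
  simp only [List.map] at h
  rw [h]
  rcases hh : goepDfs d adj (pvFuelGOP d adj) s [s] [] with ⟨r1, ⟨f1, hf1⟩⟩
  simp [goepRun, hh]
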